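-- pv_equiv track=rewrite | github.com/oguuk/Programmers | Lv2/탐욕법(Greedy) 조이스틱.py | solution
-- ===== SOURCE A (Python) =====
-- def solution(name):
--     answer = 0
--     front = 0
--     back = 0
--
--     if name[0] <= 'N':
--         answer += ord(name[0])-65
--     else:
--         answer += 91 - ord(name[0])
--
--     while True:
--         for i in range(1,len(name)):
--             if name[i] != 'A':
--                 break
--             front +=1
--         for j in range(len(name)-1,0,-1):
--             if name[j] != 'A':
--                 break
--             back +=1
--         break
--
--     if front <= back:#앞으로 진행
--         answer += len(name)-(back+1)
--         for i in range(1,len(name)-back):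
--             if name[i] <= 'N':
--                 answer += ord(name[i])-65
--             else:
--                 answer += 91 - ord(name[i])
--     else:#뒤로 진행
--         answer += len(name)-(1+front)
--         for j in range(len(name)-1,front,-1):
--             if name[j] <= 'N':
--                 answer += ord(name[j])-65
--             else:
--                 answer += 91 - ord(name[j])
--     return answer
-- ===== SOURCE B (Python) =====
-- def solution(name):
--     total = min(ord(name[0]) - 65, 91 - ord(name[0]))
--     first = None
--     last = None
--     for i in range(1, len(name)):
--         c = name[i]
--         total += min(ord(c) - 65, 91 - ord(c))
--         if c != 'A':
--             if first is None:
--                 first = i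
--             last = i
--     if first is None:
--         return total
--     return total + min(last, len(name) - first)
-- ===== Notes on version B (the rewrite author's own statement) =====
-- stated objective: alternative
-- what changed: B is a single pass over indices 1..n-1 tracking the indices of the first and last non-'A' character (no run counters, no direction branch, no sub-range vertical loops); the horizontal cost is the closed form min(last, len(name)-first), 0 when all such characters are 'A'.
import Mathlib
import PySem

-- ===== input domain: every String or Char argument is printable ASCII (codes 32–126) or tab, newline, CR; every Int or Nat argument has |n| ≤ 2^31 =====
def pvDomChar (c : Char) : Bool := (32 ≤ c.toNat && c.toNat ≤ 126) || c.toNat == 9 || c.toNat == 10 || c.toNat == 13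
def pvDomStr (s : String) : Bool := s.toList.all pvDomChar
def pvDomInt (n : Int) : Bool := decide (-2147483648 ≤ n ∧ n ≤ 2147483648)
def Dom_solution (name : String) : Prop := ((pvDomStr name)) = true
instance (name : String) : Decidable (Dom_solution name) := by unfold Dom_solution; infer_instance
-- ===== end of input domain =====

-- B replaces A's run counters, direction branch and sub-range vertical loops by a single
-- indexed pass recording the first and last non-'A' index, with the horizontal cost as the
-- closed form min(last, len(name)-first); objective: alternative.

-- ===== PORT A =====
-- vertical cost of one character, exactly A's if/else
def pvA_cost (c : Char) : Int :=
  if c ≤ 'N' then (c.toNat : Int) - 65 else 91 - (c.toNat : Int)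

-- A's counting loops: scan forward, break at the first non-'A'
def pvA_count : List Char → Nat
  | [] => 0
  | c :: cs => if c ≠ 'A' then 0 else pvA_count cs + 1

def solution (name : String) : Int :=
  match name.toList with
  | [] => 0   -- Python: name[0] raises IndexError here; excluded by Pre_solution
  | c0 :: t =>
    let answer : Int := pvA_cost c0
    let front := pvA_count t                              -- for i in range(1, len(name)) with break
    let back := pvA_count t.reverse                       -- for j in range(len(name)-1, 0, -1) with break
    if front ≤ back then
      (answer + (((t.length : Int) + 1) - ((back : Int) + 1))) +
        (t.take (t.length - back)).foldl (fun a c => a + pvA_cost c) 0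
    else
      (answer + (((t.length : Int) + 1) - (1 + (front : Int)))) +
        ((t.drop front).reverse.foldl (fun a c => a + pvA_cost c) 0)

-- ===== PORT B =====
-- Source B's loop: one indexed pass accumulating the vertical sum and recording the first and
-- last index holding a non-'A' character
def pvB_scan : List Char → Nat → Int × Option Nat × Option Nat → Int × Option Nat × Option Nat
  | [], _, st => st
  | c :: cs, i, (total, first, last) =>
    let total := total + min ((c.toNat : Int) - 65) (91 - (c.toNat : Int))
    if c ≠ 'A' then
      pvB_scan cs (i + 1) (total, (if first = none then some i else first), some i)
    else
      pvB_scan cs (i + 1) (total, first, last)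

def solution_alt (name : String) : Int :=
  match name.toList with
  | [] => 0   -- Python: name[0] raises IndexError here; excluded by Pre_solution
  | c0 :: t =>
    let st := pvB_scan t 1 (min ((c0.toNat : Int) - 65) (91 - (c0.toNat : Int)), none, none)
    match st.2.1, st.2.2 with
    | some f, some l => st.1 + min (l : Int) (((t.length : Int) + 1) - (f : Int))
    | _, _ => st.1

-- ===== PRECONDITION & SPEC =====
-- Pre_ excludes only the empty string, on which A raises IndexError at name[0].
def Pre_solution (name : String) : Prop := name ≠ ""
instance (name : String) : Decidable (Pre_solution name) := by unfold Pre_solution; infer_instance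
def pvWitness_solution : String := "JAZ"
def Spec_solution (name : String) (out : Int) : Prop := out = solution_alt name
instance (name : String) (out : Int) : Decidable (Spec_solution name out) := by unfold Spec_solution; infer_instance

-- ===== CLAIM (what is proved, stated in full; the proofs are below) =====
def Claim_equal_solution : Prop := ∀ (name : String), Dom_solution name → Pre_solution name → Spec_solution name (solution name)

-- ===== LEMMAS AND PROOFS =====

-- B's per-character cost, and the index of the first / last non-'A' character
def pvCost (c : Char) : Int := min ((c.toNat : Int) - 65) (91 - (c.toNat : Int))
def pvS (t : List Char) : Int := (t.map pvCost).sum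

def pvFirstA : List Char → Option Nat
  | [] => none
  | c :: cs => if c ≠ 'A' then some 0 else (pvFirstA cs).map (· + 1)

def pvLastA : List Char → Option Nat
  | [] => none
  | c :: cs =>
    match pvLastA cs with
    | some j => some (j + 1)
    | none => if c ≠ 'A' then some 0 else none

theorem pvA_cost_eq_min (c : Char) : pvA_cost c = pvCost c := by
  unfold pvA_cost pvCost
  have h : (c ≤ 'N') ↔ c.toNat ≤ 78 := Iff.rfl
  by_cases hc : c.toNat ≤ 78
  · rw [if_pos (h.mpr hc)]; omega
  · rw [if_neg (fun hh => hc (h.mp hh))]; omega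

-- characterisation of Source B's loop
theorem pvB_scan_eq (t : List Char) : ∀ (i : Nat) (a : Int) (fo lo : Option Nat),
    pvB_scan t i (a, fo, lo) =
      (a + pvS t,
       (match fo with | some f => some f | none => (pvFirstA t).map (· + i)),
       (match pvLastA t with | some j => some (i + j) | none => lo)) := by
  induction t with
  | nil =>
    intro i a fo lo
    cases fo <;> simp [pvB_scan, pvS, pvLastA, pvFirstA]
  | cons c cs ih =>
    intro i a fo lo
    by_cases hc : c ≠ 'A'
    · simp only [pvB_scan, if_pos hc, ih]
      refine Prod.ext ?_ (Prod.ext ?_ ?_)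
      · simp [pvS, pvCost, add_assoc]
      · cases fo with
        | some f => simp
        | none => simp [pvFirstA, hc]
      · simp only [pvLastA]
        cases h : pvLastA cs with
        | none => simp [h, hc]
        | some j => simp [h]; omega
    · rw [not_not] at hc
      subst hc
      simp only [pvB_scan, if_neg (by decide : ¬('A' ≠ 'A')), ih]
      refine Prod.ext ?_ (Prod.ext ?_ ?_)
      · simp [pvS, pvCost, add_assoc]
      · cases fo with
        | some f => rfl
        | none =>
          simp only [pvFirstA, if_neg (by decide : ¬('A' ≠ 'A'))]
          cases h : pvFirstA cs with
          | none => simp [h]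
          | some f => simp [h]; omega
      · simp only [pvLastA]
        cases h : pvLastA cs with
        | none => simp [h]
        | some j => simp [h]; omega

-- A's leading-run counter in terms of the first non-'A' index
theorem pvA_count_eq_firstA (t : List Char) : pvA_count t = (pvFirstA t).getD t.length := by
  induction t with
  | nil => rfl
  | cons c cs ih =>
    simp only [pvA_count, pvFirstA]
    by_cases hc : c ≠ 'A'
    · simp [hc]
    · rw [if_neg hc, if_neg hc, ih]
      cases h : pvFirstA cs <;> simp

theorem pvLastA_lt (t : List Char) (j : Nat) (h : pvLastA t = some j) : j < t.length := by
  induction t generalizing j with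
  | nil => simp [pvLastA] at h
  | cons c cs ih =>
    simp only [pvLastA, List.length_cons] at h ⊢
    split at h
    · next k hk =>
      simp only [Option.some.injEq] at h
      have := ih k hk
      omega
    · split at h
      · simp only [Option.some.injEq] at h
        omega
      · exact absurd h (by simp)

theorem pvA_count_append (xs : List Char) (c : Char) :
    pvA_count (xs ++ [c]) =
      if pvA_count xs = xs.length then (if c ≠ 'A' then xs.length else xs.length + 1)
      else pvA_count xs := by
  induction xs with
  | nil =>
    by_cases hc : c ≠ 'A' <;> simp [pvA_count, hc]
  | cons x xs ih =>
    by_cases hx : x ≠ 'A'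
    · simp only [List.cons_append, pvA_count, if_pos hx, List.length_cons]
      rw [if_neg (by omega)]
    · rw [not_not] at hx
      subst hx
      have hL : pvA_count (('A' :: xs) ++ [c]) = pvA_count (xs ++ [c]) + 1 := by
        simp [pvA_count]
      have hR : pvA_count ('A' :: xs) = pvA_count xs + 1 := by
        simp [pvA_count]
      rw [hL, hR, ih, List.length_cons]
      split_ifs <;> omega

-- A's trailing-run counter in terms of the last non-'A' index
theorem pvA_count_rev (t : List Char) :
    pvA_count t.reverse =
      match pvLastA t with | none => t.length | some j => t.length - 1 - j := by
  induction t with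
  | nil => rfl
  | cons c cs ih =>
    cases h : pvLastA cs with
    | none =>
      have hrev : pvA_count cs.reverse = cs.length := by rw [ih, h]
      rw [List.reverse_cons, pvA_count_append, List.length_reverse, hrev, if_pos rfl]
      simp only [pvLastA, h, List.length_cons]
      by_cases hc : c ≠ 'A' <;> simp [hc]
    | some j =>
      have hj := pvLastA_lt cs j h
      have hrev : pvA_count cs.reverse = cs.length - 1 - j := by rw [ih, h]
      rw [List.reverse_cons, pvA_count_append, List.length_reverse, hrev, if_neg (by omega)]
      have hcc : pvLastA (c :: cs) = some (j + 1) := by simp [pvLastA, h]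
      rw [hcc]
      simp only [List.length_cons]
      rw [Nat.add_sub_cancel, Nat.sub_sub, Nat.add_comm 1 j]

-- firstA and lastA are none together
theorem pvFirstA_none_iff (t : List Char) : pvFirstA t = none ↔ pvLastA t = none := by
  induction t with
  | nil => simp [pvFirstA, pvLastA]
  | cons c cs ih =>
    by_cases hc : c ≠ 'A'
    · simp only [pvFirstA, pvLastA, if_pos hc]
      constructor
      · intro h; simp at h
      · intro h
        cases h2 : pvLastA cs <;> rw [h2] at h <;> simp [hc] at h
    · simp only [pvFirstA, pvLastA, if_neg hc]
      cases h2 : pvLastA cs with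
      | none =>
        simp only [Option.map_eq_none_iff]
        simp [ih, h2]
      | some j =>
        simp only [Option.map_eq_none_iff]
        simp [ih, h2]

theorem pvFirstA_lt (t : List Char) (f : Nat) (h : pvFirstA t = some f) : f < t.length := by
  induction t generalizing f with
  | nil => simp [pvFirstA] at h
  | cons c cs ih =>
    simp only [pvFirstA] at h
    split at h
    · simp at h; simp [← h]
    · cases hcs : pvFirstA cs with
      | none => rw [hcs] at h; simp at h
      | some k =>
        rw [hcs] at h
        simp at h
        have := ih k hcs
        simp [← h]
        omega

-- helper: folds of A's per-character cost as mapped sums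
theorem foldl_cost (f : Char → Int) (xs : List Char) (a : Int) :
    xs.foldl (fun a c => a + f c) a = a + (xs.map f).sum := by
  induction xs generalizing a with
  | nil => simp
  | cons c cs ih => simp [List.foldl_cons, ih, add_assoc]

theorem pvA_count_take_A (xs : List Char) (x : Char) (hx : x ∈ xs.take (pvA_count xs)) : x = 'A' := by
  induction xs with
  | nil => simp at hx
  | cons c cs ih =>
    simp only [pvA_count] at hx
    split at hx
    · simp at hx
    · next hc =>
      rw [List.take_succ_cons, List.mem_cons] at hx
      rcases hx with h | h
      · rw [h]; exact (not_not.mp hc)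
      · exact ih h

theorem sum_cost_A_zero (l : List Char) (h : ∀ x ∈ l, x = 'A') :
    (l.map pvA_cost).sum = 0 := by
  induction l with
  | nil => rfl
  | cons c cs ih =>
    have hc : c = 'A' := h c (List.mem_cons_self)
    have : pvA_cost c = 0 := by rw [hc]; decide
    simp [this, ih (fun x hx => h x (List.mem_cons_of_mem _ hx))]

theorem pvA_count_le (xs : List Char) : pvA_count xs ≤ xs.length := by
  induction xs with
  | nil => exact Nat.le_refl 0
  | cons c cs ih =>
    simp only [pvA_count, List.length_cons]
    split <;> omega

theorem drop_back_all_A (t : List Char) (x : Char)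
    (hx : x ∈ t.drop (t.length - pvA_count t.reverse)) : x = 'A' := by
  have hrw : t.drop (t.length - pvA_count t.reverse)
      = (t.reverse.take (pvA_count t.reverse)).reverse := by
    rw [List.reverse_take, List.reverse_reverse, List.length_reverse]
  rw [hrw, List.mem_reverse] at hx
  exact pvA_count_take_A _ _ hx

-- A canonicalised: full vertical sum plus len-1 minus the bigger run
theorem solution_canon (name : String) (c0 : Char) (t : List Char) (hts : name.toList = c0 :: t) :
    solution name = pvCost c0 + pvS t
      + ((t.length : Int) - ((max (pvA_count t) (pvA_count t.reverse) : Nat) : Int)) := by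
  unfold solution
  rw [hts]
  simp only []
  set f := pvA_count t with hf
  set b := pvA_count t.reverse with hb
  have hble : b ≤ t.length := by simpa using pvA_count_le t.reverse
  have hfle : f ≤ t.length := pvA_count_le t
  have hsum : pvS t = (t.map pvA_cost).sum := by
    unfold pvS
    exact congrArg List.sum (List.map_congr_left (fun x _ => (pvA_cost_eq_min x).symm))
  rw [pvA_cost_eq_min c0, hsum]
  by_cases hfb : f ≤ b
  · rw [if_pos hfb]
    rw [foldl_cost]
    have hsplit : (t.map pvA_cost).sum
        = ((t.take (t.length - b)).map pvA_cost).sum + ((t.drop (t.length - b)).map pvA_cost).sum := by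
      conv_lhs => rw [← List.take_append_drop (t.length - b) t]
      rw [List.map_append, List.sum_append]
    have hz : ((t.drop (t.length - b)).map pvA_cost).sum = 0 :=
      sum_cost_A_zero _ (fun x hx => drop_back_all_A t x hx)
    have hmax : max f b = b := Nat.max_eq_right hfb
    rw [hsplit, hz, hmax]
    push_cast
    ring
  · rw [if_neg hfb]
    rw [foldl_cost]
    have hsplit : (t.map pvA_cost).sum
        = ((t.take f).map pvA_cost).sum + ((t.drop f).map pvA_cost).sum := by
      conv_lhs => rw [← List.take_append_drop f t]
      rw [List.map_append, List.sum_append]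
    have hz : ((t.take f).map pvA_cost).sum = 0 :=
      sum_cost_A_zero _ (fun x hx => pvA_count_take_A t x hx)
    have hrev : ((t.drop f).reverse.map pvA_cost).sum = ((t.drop f).map pvA_cost).sum := by
      rw [List.map_reverse, List.sum_reverse]
    have hmax : max f b = f := Nat.max_eq_left (Nat.le_of_not_le hfb)
    rw [hsplit, hz, hrev, hmax]
    push_cast
    ring

-- B canonicalised to the same form
theorem solution_alt_canon (name : String) (c0 : Char) (t : List Char) (hts : name.toList = c0 :: t) :
    solution_alt name = pvCost c0 + pvS t
      + ((t.length : Int) - ((max (pvA_count t) (pvA_count t.reverse) : Nat) : Int)) := by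
  unfold solution_alt
  rw [hts]
  simp only []
  rw [pvB_scan_eq]
  cases hF : pvFirstA t with
  | none =>
    have hL : pvLastA t = none := (pvFirstA_none_iff t).mp hF
    simp only [hF, hL]
    have h1 : pvA_count t = t.length := by rw [pvA_count_eq_firstA, hF]; rfl
    have h2 : pvA_count t.reverse = t.length := by rw [pvA_count_rev, hL]
    rw [h1, h2]
    simp [pvCost]
  | some f =>
    cases hL : pvLastA t with
    | none => exact absurd hF (by rw [(pvFirstA_none_iff t).mpr hL]; simp)
    | some j =>
      simp only [hF, hL, Option.map_some]
      have h1 : pvA_count t = f := by rw [pvA_count_eq_firstA, hF]; rfl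
      have h2 : pvA_count t.reverse = t.length - 1 - j := by rw [pvA_count_rev, hL]
      have hfl := pvFirstA_lt t f hF
      have hjl := pvLastA_lt t j hL
      rw [h1, h2]
      have : pvCost c0 + pvS t + min ((1 + j : Nat) : Int) (((t.length : Int) + 1) - ((f + 1 : Nat) : Int))
          = pvCost c0 + pvS t + ((t.length : Int) - ((max f (t.length - 1 - j) : Nat) : Int)) := by
        have hmin : min ((1 + j : Nat) : Int) (((t.length : Int) + 1) - ((f + 1 : Nat) : Int))
            = (t.length : Int) - ((max f (t.length - 1 - j) : Nat) : Int) := by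
          push_cast
          omega
        rw [hmin]
      simpa [pvCost] using this

-- ===== VERDICT (by name: the statement is the Claim_ definition above) =====
theorem solution_spec : Claim_equal_solution := by
  intro name _ hpre
  unfold Spec_solution
  have hs : name.toList ≠ [] := by
    intro h
    exact hpre (String.ext (by simp [h]))
  cases hts : name.toList with
  | nil => exact absurd hts hs
  | cons c0 t =>
    rw [solution_canon name c0 t hts, solution_alt_canon name c0 t hts]
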